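-- pv_equiv track=rewrite | github.com/ful1e5/clickgen | src/clickgen/builders.py | make_framesets
-- ===== SOURCE A (Python) =====
-- from typing import Any, List, NamedTuple, Tuple, Union
--
-- ConfigFrame = Tuple[int, int, int, str, int]
--
-- def make_framesets(frames: List[ConfigFrame]) -> List[List[ConfigFrame]]:
--     """Internal **static method** for convert ``frames`` to ``framessets``.
--
--     **framessets** are group of similar pixel sizes. Each **frameset** is \
--             structured with python structure ``List``.
--
--     :param frames: ``config_file`` lines with List & Tuple typing.
--     :type frames: ``List[ConfigFrame]``
--
--     :returns: Grouped frames in ``List`` structure.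
--     :rtype: ``List[List[ConfigFrame]]``
--
--     :raise ValueError: If config_file lines are not sorted with pixel \
--             size & frame number.
--     :raise ValueError: If some frames are missing from pixel size inside \
--             config_file.
--     :raise ValueError: If frame's **animation durations** are not same \
--             as other frame.
--     """
--
--     framesets: List[List[ConfigFrame]] = []
--     sizes = set()
--
--     # This assumes that frames are sorted
--     size: int = 0
--     counter: int = 0
--     for i, frame in enumerate(frames):
--
--         if size == 0 or frame[0] != size:
--             counter = 0
--             size = frame[0]
--
--             if size in sizes:
--                 raise ValueError(
--                     f"Frames are not sorted: frame {i} has size {size}, but we have seen that already"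
--                 )
--
--             sizes.add(size)
--
--         if counter >= len(framesets):
--             framesets.append([])
--
--         framesets[counter].append(frame)
--         counter += 1
--
--     for i in range(1, len(framesets)):
--         if len(framesets[i - 1]) != len(framesets[i]):
--             raise ValueError(
--                 f"Frameset {i} has size {len(framesets[i])}, expected {len(framesets[i - 1])}"
--             )
--
--     for frameset in framesets:
--         for i in range(1, len(frameset)):
--             if frameset[i - 1][4] != frameset[i][4]:
--                 raise ValueError(
--                     f"Frameset {i} has duration {int(frameset[i][4])} for framesize {int(frameset[i][0])}, but {int(frameset[i - 1][4])} for framesize {int(frameset[i - 1][0])}"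
--                 )
--     framesets = sorted(framesets, reverse=True)
--
--     return framesets
-- ===== SOURCE B (Python) =====
-- from typing import List, Tuple
--
-- ConfigFrame = Tuple[int, int, int, str, int]
--
-- def make_framesets(frames: List[ConfigFrame]) -> List[List[ConfigFrame]]:
--     # Group the frames into consecutive same-size runs (a run breaks after a
--     # size-0 frame or on a size change), then transpose the runs into
--     # position-indexed framesets.
--     groups: List[List[ConfigFrame]] = []
--     run: List[ConfigFrame] = []
--     seen = set()
--     prev = 0
--     for i, frame in enumerate(frames):
--         size = frame[0]
--         if prev == 0 or size != prev:
--             if size in seen: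
--                 raise ValueError(
--                     f"Frames are not sorted: frame {i} has size {size}, but we have seen that already"
--                 )
--             seen.add(size)
--             if run:
--                 groups.append(run)
--             run = [frame]
--             prev = size
--         else:
--             run.append(frame)
--     if run:
--         groups.append(run)
--
--     for i, group in enumerate(groups[1:], 1):
--         if len(group) != len(groups[0]):
--             raise ValueError(
--                 f"Frameset {i} has size {len(group)}, expected {len(groups[0])}"
--             )
--
--     framesets = [list(col) for col in zip(*groups)]
--
--     for frameset in framesets:
--         for frame in frameset:
--             if frame[4] != frameset[0][4]:
--                 raise ValueError(
--                     f"Frameset has duration {int(frame[4])} for framesize {int(frame[0])}, but {int(frameset[0][4])}"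
--                 )
--
--     return sorted(framesets, reverse=True)
-- ===== Notes on version B (the rewrite author's own statement) =====
-- stated objective: alternative
-- what changed: B builds the per-size runs explicitly in one pass and recovers the position-indexed framesets by transposing the runs with zip(*groups) (after validating the run lengths), instead of A's interleaved placement of every frame into framesets[counter]; validation order (not-sorted, lengths, durations) and the final reverse sort are kept.
import Mathlib
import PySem

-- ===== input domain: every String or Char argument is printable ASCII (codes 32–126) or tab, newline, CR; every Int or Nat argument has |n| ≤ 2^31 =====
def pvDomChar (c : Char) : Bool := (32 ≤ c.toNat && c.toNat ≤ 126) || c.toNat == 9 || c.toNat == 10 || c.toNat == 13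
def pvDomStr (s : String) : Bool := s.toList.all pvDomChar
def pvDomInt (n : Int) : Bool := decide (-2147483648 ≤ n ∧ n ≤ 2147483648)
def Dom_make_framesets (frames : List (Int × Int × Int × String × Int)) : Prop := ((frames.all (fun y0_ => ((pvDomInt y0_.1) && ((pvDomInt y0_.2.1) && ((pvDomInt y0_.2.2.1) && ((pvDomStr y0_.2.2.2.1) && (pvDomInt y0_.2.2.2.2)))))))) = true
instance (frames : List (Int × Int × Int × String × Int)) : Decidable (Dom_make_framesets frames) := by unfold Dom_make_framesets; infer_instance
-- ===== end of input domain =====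

-- B rebuilds the framesets by grouping the frames into consecutive same-size runs and
-- transposing the runs, instead of A's counter-indexed bucket placement (objective: alternative).

abbrev pvF : Type := Int × Int × Int × String × Int

-- ---- shared helper: Python's `sorted(framesets, reverse=True)` (both Pythons end with this line).
-- Python compares lists/tuples lexicographically and strings by code point; ported by hand, exact.
def pvCharsLt : List Char → List Char → Bool
  | [], [] => false
  | [], _ :: _ => true
  | _ :: _, [] => false
  | a :: as, b :: bs =>
    if a.toNat < b.toNat then true else if b.toNat < a.toNat then false else pvCharsLt as bs

def pvFrameLt (a b : pvF) : Bool :=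
  if a.1 < b.1 then true else if b.1 < a.1 then false else
  if a.2.1 < b.2.1 then true else if b.2.1 < a.2.1 then false else
  if a.2.2.1 < b.2.2.1 then true else if b.2.2.1 < a.2.2.1 then false else
  if pvCharsLt a.2.2.2.1.toList b.2.2.2.1.toList then true else
  if pvCharsLt b.2.2.2.1.toList a.2.2.2.1.toList then false else
  decide (a.2.2.2.2 < b.2.2.2.2)

def pvFsLt : List pvF → List pvF → Bool
  | [], [] => false
  | [], _ :: _ => true
  | _ :: _, [] => false
  | a :: as, b :: bs => if pvFrameLt a b then true else if pvFrameLt b a then false else pvFsLt as bs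

-- stable insertion sort with reversed order, exactly Python's sorted(xs, reverse=True)
-- (same shape as PySem.List.sorted_rev_eq_foldl_insertBy, with the hand-ported list order)
def pvSortRev (xss : List (List pvF)) : List (List pvF) :=
  xss.foldl (fun acc x => PySem.List.insertBy (fun a b => pvFsLt b a) x acc) []

-- ===== PORT A =====
-- framesets[counter].append(frame), appending a fresh bucket when counter == len(framesets)
def pvPlace (fss : List (List pvF)) (counter : Nat) (f : pvF) : List (List pvF) :=
  (if fss.length ≤ counter then fss ++ [[]] else fss).modify counter (fun b => b ++ [f])

-- A's main loop; none = the ValueError "Frames are not sorted"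
def pvLoopA : List pvF → List (List pvF) → PySem.Set Int → Int → Nat → Option (List (List pvF))
  | [], fss, _, _, _ => some fss
  | f :: rest, fss, sizes, size, counter =>
    if size == 0 || f.1 != size then
      if sizes.contains f.1 then none
      else pvLoopA rest (pvPlace fss 0 f) (sizes.add f.1) f.1 1
    else pvLoopA rest (pvPlace fss counter f) sizes size (counter + 1)

-- for i in range(1, len(framesets)): adjacent length check (false = ValueError)
def pvLenChainOk : List (List pvF) → Bool
  | [] => true
  | [_] => true
  | a :: b :: t => a.length == b.length && pvLenChainOk (b :: t)

-- for i in range(1, len(frameset)): adjacent duration check (false = ValueError)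
def pvDurChainOk : List pvF → Bool
  | [] => true
  | [_] => true
  | a :: b :: t => a.2.2.2.2 == b.2.2.2.2 && pvDurChainOk (b :: t)

def make_framesets (frames : List (Int × Int × Int × String × Int)) : List (List (Int × Int × Int × String × Int)) :=
  match pvLoopA frames [] PySem.Set.empty 0 0 with
  | none => []
  | some fss =>
    if pvLenChainOk fss then
      if fss.all pvDurChainOk then pvSortRev fss else []
    else []

-- ===== PORT B =====
-- B's run-building loop: state (groups, seen, run, prev); none = ValueError "Frames are not sorted"
def pvLoopB : List pvF → List (List pvF) → PySem.Set Int → List pvF → Int → Option (List (List pvF) × List pvF)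
  | [], groups, _, run, _ => some (groups, run)
  | f :: rest, groups, seen, run, prev =>
    if prev == 0 || f.1 != prev then
      if seen.contains f.1 then none
      else pvLoopB rest (if run.isEmpty then groups else groups ++ [run]) (seen.add f.1) [f] f.1
    else pvLoopB rest groups seen (run ++ [f]) prev

def pvDefFrame : pvF := (0, 0, 0, "", 0)

-- [list(col) for col in zip(*groups)] : zip truncates at the shortest list
def pvTransposeB (gs : List (List pvF)) : List (List pvF) :=
  match gs with
  | [] => []
  | g0 :: _ =>
    (List.range (gs.foldl (fun m g => min m g.length) g0.length)).map
      (fun i => gs.map (fun g => g.getD i pvDefFrame))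

-- for g in groups[1:]: len(g) != len(groups[0]) (false = ValueError)
def pvLenOkB : List (List pvF) → Bool
  | [] => true
  | g0 :: rest => rest.all (fun g => g.length == g0.length)

-- for frame in frameset: frame[4] != frameset[0][4] (false = ValueError)
def pvDurOkB (fs : List pvF) : Bool :=
  fs.all (fun f => f.2.2.2.2 == (fs.headD pvDefFrame).2.2.2.2)

def make_framesets_alt (frames : List (Int × Int × Int × String × Int)) : List (List (Int × Int × Int × String × Int)) :=
  match pvLoopB frames [] PySem.Set.empty [] 0 with
  | none => []
  | some gr =>
    let groups := if gr.2.isEmpty then gr.1 else gr.1 ++ [gr.2]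
    if pvLenOkB groups then
      let fss := pvTransposeB groups
      if fss.all pvDurOkB then pvSortRev fss else []
    else []

-- ===== PRECONDITION & SPEC =====
def pvHeadSize (r : List pvF) : Int := (r.headD pvDefFrame).1

-- the maximal consecutive same-size blocks of the input (a shape description, via Mathlib's splitBy)
def pvGroups (frames : List pvF) : List (List pvF) := frames.splitBy (fun a b => a.1 == b.1)

def pvGroupLen (frames : List pvF) : Nat := ((pvGroups frames).headD []).length

-- Pre_ excludes exactly the inputs on which A raises ValueError: two consecutive frames of
-- the sentinel size 0, a pixel size reappearing in a later block, blocks of unequal length,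
-- or a non-uniform duration within a position-indexed frameset.
def Pre_make_framesets (frames : List (Int × Int × Int × String × Int)) : Prop :=
  List.IsChain (fun p q : pvF => p.1 = q.1 → p.1 ≠ 0) frames ∧
  ((pvGroups frames).map pvHeadSize).Nodup ∧
  (∀ r ∈ pvGroups frames, r.length = pvGroupLen frames) ∧
  (∀ i ∈ List.range (pvGroupLen frames), ∀ r ∈ pvGroups frames,
     (r.getD i pvDefFrame).2.2.2.2 = (((pvGroups frames).headD []).getD i pvDefFrame).2.2.2.2)

instance (frames : List (Int × Int × Int × String × Int)) : Decidable (Pre_make_framesets frames) := by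
  unfold Pre_make_framesets; infer_instance

def pvWitness_make_framesets : (List (Int × Int × Int × String × Int)) :=
  [(32, 0, 0, "a", 50), (32, 1, 0, "b", 60), (16, 0, 0, "c", 50), (16, 1, 0, "d", 60)]

def Spec_make_framesets (frames : List (Int × Int × Int × String × Int)) (out : List (List (Int × Int × Int × String × Int))) : Prop := out = make_framesets_alt frames
instance (frames : List (Int × Int × Int × String × Int)) (out : List (List (Int × Int × Int × String × Int))) : Decidable (Spec_make_framesets frames out) := by unfold Spec_make_framesets; infer_instance

-- ===== CLAIM (what is proved, stated in full; the proofs are below) =====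
def Claim_equal_make_framesets : Prop := ∀ (frames : List (Int × Int × Int × String × Int)), Dom_make_framesets frames → Pre_make_framesets frames → Spec_make_framesets frames (make_framesets frames)

-- ===== LEMMAS AND PROOFS =====

-- proof-side: the runs as both loops actually traverse them (a run also breaks after a
-- size-0 frame, mirroring the `size == 0` sentinel both Pythons use)
def pvRunsGo (prev : Int) (cur : List pvF) : List pvF → List (List pvF)
  | [] => [cur]
  | f :: rest =>
    if prev == 0 || f.1 != prev then cur :: pvRunsGo f.1 [f] rest
    else pvRunsGo prev (cur ++ [f]) rest

def pvRuns : List pvF → List (List pvF)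
  | [] => []
  | f :: rest => pvRunsGo f.1 [f] rest



-- positional distribution of one run over the buckets (what A's inner counter does)
def pvBkAdd : List (List pvF) → List pvF → List (List pvF)
  | fss, [] => fss
  | b :: bs, x :: xs => (b ++ [x]) :: pvBkAdd bs xs
  | [], x :: xs => [x] :: pvBkAdd [] xs

theorem pvRunsGo_ne_nil (l : List pvF) (prev : Int) (cur : List pvF) :
    pvRunsGo prev cur l ≠ [] := by
  induction l generalizing prev cur with
  | nil => simp [pvRunsGo]
  | cons f rest ih => simp only [pvRunsGo]; split <;> simp [ih]

theorem pvRunsGo_flatten (l : List pvF) (prev : Int) (cur : List pvF) :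
    (pvRunsGo prev cur l).flatten = cur ++ l := by
  induction l generalizing prev cur with
  | nil => simp [pvRunsGo]
  | cons f rest ih => simp only [pvRunsGo]; split <;> simp [ih]

theorem pvRunsGo_head_size (l : List pvF) (prev : Int) (cur : List pvF) (hc : cur ≠ []) :
    pvHeadSize ((pvRunsGo prev cur l).headD []) = pvHeadSize cur := by
  induction l generalizing prev cur with
  | nil => simp [pvRunsGo]
  | cons f rest ih =>
    simp only [pvRunsGo]; split
    · simp
    · rw [ih _ _ (by simp)]
      cases cur with
      | nil => exact absurd rfl hc
      | cons a t => simp [pvHeadSize]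

theorem pvRunsGo_good (l : List pvF) (prev : Int) (cur : List pvF)
    (hc : cur ≠ []) (hu : ∀ x ∈ cur, x.1 = prev) (hz : prev = 0 → cur.length = 1) :
    (∀ r ∈ pvRunsGo prev cur l,
        r ≠ [] ∧ (∀ x ∈ r, x.1 = pvHeadSize r) ∧ (pvHeadSize r = 0 → r.length = 1)) ∧
      List.IsChain (fun a b => pvHeadSize a = 0 ∨ pvHeadSize b ≠ pvHeadSize a)
        (pvRunsGo prev cur l) := by
  induction l generalizing prev cur with
  | nil =>
    refine ⟨?_, by simp [pvRunsGo]⟩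
    intro r hr
    simp only [pvRunsGo, List.mem_singleton] at hr
    subst hr
    have hps : pvHeadSize r = prev := by
      cases r with
      | nil => exact absurd rfl hc
      | cons a t => simpa [pvHeadSize] using hu a (by simp)
    exact ⟨hc, by rw [hps]; exact hu, by rw [hps]; exact hz⟩
  | cons f rest ih =>
    simp only [pvRunsGo]
    split
    · rename_i hcond
      have hcur : pvHeadSize cur = prev := by
        cases cur with
        | nil => exact absurd rfl hc
        | cons a t => simpa [pvHeadSize] using hu a (by simp)
      have ihres := ih f.1 [f] (by simp) (by simp) (by simp)
      refine ⟨?_, ?_⟩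
      · intro r hr
        rcases List.mem_cons.mp hr with h | h
        · subst h
          refine ⟨hc, by rw [hcur]; exact hu, by rw [hcur]; exact hz⟩
        · exact ihres.1 r h
      · cases hgo : pvRunsGo f.1 [f] rest with
        | nil => exact absurd hgo (pvRunsGo_ne_nil rest f.1 [f])
        | cons r0 rs =>
          rw [List.isChain_cons_cons]
          constructor
          · have h0 : pvHeadSize r0 = f.1 := by
              have := pvRunsGo_head_size rest f.1 [f] (by simp)
              rw [hgo] at this
              simpa [pvHeadSize] using this
            rw [hcur, h0]
            simp only [Bool.or_eq_true, beq_iff_eq, bne_iff_ne, ne_eq] at hcond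
            exact hcond
          · rw [← hgo]; exact ihres.2
    · rename_i hcond
      simp only [Bool.or_eq_true, beq_iff_eq, bne_iff_ne, ne_eq, not_or, not_not] at hcond
      exact ih prev (cur ++ [f]) (by simp)
        (by intro x hx
            rcases List.mem_append.mp hx with h | h
            · exact hu x h
            · rw [List.mem_singleton] at h; subst h; exact hcond.2)
        (by intro h0; exact absurd h0 hcond.1)

theorem pvPlace_eq (fss : List (List pvF)) (c : Nat) (x : pvF) (h : c ≤ fss.length) :
    pvPlace fss c x = fss.take c ++ ((fss.drop c).headD [] ++ [x]) :: (fss.drop c).tail := by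
  unfold pvPlace
  rcases Nat.lt_or_ge c fss.length with hlt | hge
  · rw [if_neg (by omega), List.modify_eq_take_cons_drop hlt]
    have hd : fss.drop c = fss[c] :: fss.drop (c + 1) := List.drop_eq_getElem_cons hlt
    rw [hd]
    simp [List.getElem?_eq_getElem hlt]
  · have hc' : c = fss.length := le_antisymm h hge
    subst hc'
    rw [if_pos (by omega)]
    rw [List.modify_eq_take_cons_drop (by simp)]
    simp

theorem pvLoopA_run (r : List pvF) (rest : List pvF) (fss : List (List pvF))
    (sizes : PySem.Set Int) (s : Int) (c : Nat)
    (hu : ∀ x ∈ r, x.1 = s) (hs : s ≠ 0) (hc : c ≤ fss.length) :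
    pvLoopA (r ++ rest) fss sizes s c
      = pvLoopA rest (fss.take c ++ pvBkAdd (fss.drop c) r) sizes s (c + r.length) := by
  induction r generalizing fss c with
  | nil => simp [pvBkAdd]
  | cons x xs ih =>
    have hx : x.1 = s := hu x (by simp)
    have hcond : (s == 0 || x.1 != s) = false := by
      simp [hx, hs]
    simp only [List.cons_append, pvLoopA, hcond, Bool.false_eq_true, if_false]
    have hlen : (pvPlace fss c x).length = c + 1 + (fss.drop c).tail.length := by
      rw [pvPlace_eq fss c x hc]
      simp [List.length_take, Nat.min_eq_left hc]
      omega
    rw [ih (pvPlace fss c x) (c + 1) (fun y hy => hu y (by simp [hy])) (by omega)]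
    congr 1
    · rw [pvPlace_eq fss c x hc]
      have htk : (fss.take c).length = c := by simp [Nat.min_eq_left hc]
      rw [List.take_append, List.drop_append]
      rw [htk]
      simp only [Nat.add_sub_cancel_left]
      rw [List.take_of_length_le (by omega), List.take_succ_cons, List.take_zero,
          List.drop_succ_cons, List.drop_zero]
      have hdrop : List.drop (c + 1) (List.take c fss) = [] :=
        List.drop_of_length_le (by rw [htk]; omega)
      rw [hdrop]
      cases hdc : fss.drop c with
      | nil => simp [pvBkAdd]
      | cons d0 ds => simp [pvBkAdd]
    · simp; omega

theorem pvPlace_zero (fss : List (List pvF)) (f : pvF) :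
    pvPlace fss 0 f = (fss.headD [] ++ [f]) :: fss.tail := by
  rw [pvPlace_eq fss 0 f (by omega)]; simp

theorem pvBkAdd_cons (fss : List (List pvF)) (f : pvF) (r : List pvF) :
    pvBkAdd fss (f :: r) = (fss.headD [] ++ [f]) :: pvBkAdd fss.tail r := by
  cases fss <;> simp [pvBkAdd]

theorem pvLoopA_runs (rs : List (List pvF)) (fss : List (List pvF))
    (sizes : PySem.Set Int) (size : Int) (counter : Nat)
    (h1 : ∀ r ∈ rs, r ≠ [] ∧ (∀ x ∈ r, x.1 = pvHeadSize r) ∧ (pvHeadSize r = 0 → r.length = 1))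
    (h4 : List.IsChain (fun a b => pvHeadSize a = 0 ∨ pvHeadSize b ≠ pvHeadSize a) rs)
    (h5 : rs ≠ [] → (size = 0 ∨ pvHeadSize (rs.headD []) ≠ size))
    (h6 : ∀ r ∈ rs, ¬ pvHeadSize r ∈ sizes)
    (h7 : (rs.map pvHeadSize).Nodup) :
    pvLoopA rs.flatten fss sizes size counter = some (rs.foldl pvBkAdd fss) := by
  induction rs generalizing fss sizes size counter with
  | nil => simp [pvLoopA]
  | cons r rs' ih =>
    obtain ⟨hrne, hru, hrz⟩ := h1 r (by simp)
    cases r with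
    | nil => exact absurd rfl hrne
    | cons f r' =>
      have hf : f.1 = pvHeadSize (f :: r') := hru f (by simp)
      have hfire : size = 0 ∨ pvHeadSize (f :: r') ≠ size := by
        simpa using h5 (by simp)
      have hcond : (size == 0 || f.1 != size) = true := by
        rcases hfire with h | h <;> simp [hf, h]
      have hcont : sizes.contains f.1 = false := by
        have := h6 (f :: r') (by simp)
        rw [hf]
        simp only [PySem.Set.contains_eq_listContains, List.contains_eq_mem]
        simpa using this
      have hstep : pvLoopA ((f :: r') ++ rs'.flatten) fss sizes size counter
          = pvLoopA (r' ++ rs'.flatten) (pvPlace fss 0 f) (sizes.add f.1) f.1 1 := by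
        simp only [List.cons_append, pvLoopA, hcond, if_true, hcont, Bool.false_eq_true, if_false]
      have hmid : pvLoopA (r' ++ rs'.flatten) (pvPlace fss 0 f) (sizes.add f.1) f.1 1
          = pvLoopA rs'.flatten (pvBkAdd fss (f :: r')) (sizes.add f.1) f.1 (f :: r').length := by
        by_cases hz0 : pvHeadSize (f :: r') = 0
        · have : (f :: r').length = 1 := hrz hz0
          have hr' : r' = [] := by simpa using this
          subst hr'
          rw [pvBkAdd_cons, pvPlace_zero]
          simp [pvBkAdd]
        · rw [pvLoopA_run r' rs'.flatten (pvPlace fss 0 f) (sizes.add f.1) f.1 1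
              (fun y hy => by rw [hru y (by simp [hy])]; exact hf.symm ▸ rfl)
              (by rw [hf]; exact hz0)
              (by rw [pvPlace_zero]; simp)]
          rw [pvPlace_zero]
          simp only [List.take_succ_cons, List.take_zero, List.drop_succ_cons, List.drop_zero]
          rw [pvBkAdd_cons]
          simp [Nat.add_comm]
      rw [List.flatten_cons] at *
      rw [hstep, hmid]
      have hnotin : pvHeadSize (f :: r') ∉ rs'.map pvHeadSize := by
        have := h7
        simp only [List.map_cons, List.nodup_cons] at this
        exact this.1
      rw [hf]
      rw [ih (pvBkAdd fss (f :: r')) (sizes.add (pvHeadSize (f :: r'))) (pvHeadSize (f :: r')) (f :: r').length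
          (fun q hq => h1 q (by simp [hq]))
          (by
            cases rs' with
            | nil => simp
            | cons q qs => exact (List.isChain_cons_cons.mp h4).2)
          (by
            intro hne
            cases rs' with
            | nil => exact absurd rfl hne
            | cons q qs =>
              have := (List.isChain_cons_cons.mp h4).1
              simpa using this)
          (by
            intro q hq
            have hmem := h6 q (by simp [hq])
            rw [PySem.Set.mem_add]
            push Not
            refine ⟨hmem, ?_⟩
            intro heq
            exact hnotin (heq ▸ List.mem_map_of_mem hq))
          (by
            have := h7
            simp only [List.map_cons, List.nodup_cons] at this
            exact this.2)]
      simp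

theorem pvLoopB_runs (l : List pvF) (prev : Int) (cur : List pvF)
    (groups : List (List pvF)) (seen : PySem.Set Int)
    (hc : cur ≠ [])
    (hn : (((pvRunsGo prev cur l).map pvHeadSize).tail).Nodup)
    (hs : ∀ h ∈ ((pvRunsGo prev cur l).map pvHeadSize).tail, ¬ h ∈ seen) :
    pvLoopB l groups seen cur prev
      = some (groups ++ (pvRunsGo prev cur l).dropLast, (pvRunsGo prev cur l).getLastD []) := by
  induction l generalizing prev cur groups seen with
  | nil => simp [pvLoopB, pvRunsGo]
  | cons f rest ih =>
    by_cases hcond : (prev == 0 || f.1 != prev) = true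
    · have hgo : pvRunsGo prev cur (f :: rest) = cur :: pvRunsGo f.1 [f] rest := by
        simp only [pvRunsGo, hcond, if_true]
      cases hq : pvRunsGo f.1 [f] rest with
      | nil => exact absurd hq (pvRunsGo_ne_nil rest f.1 [f])
      | cons q qs =>
        have hq0 : pvHeadSize q = f.1 := by
          have := pvRunsGo_head_size rest f.1 [f] (by simp)
          rw [hq] at this
          simpa [pvHeadSize] using this
        have htail : ((pvRunsGo prev cur (f :: rest)).map pvHeadSize).tail
            = pvHeadSize q :: qs.map pvHeadSize := by
          rw [hgo, hq]; simp
        rw [htail] at hn hs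
        have hcont : seen.contains f.1 = false := by
          have := hs (pvHeadSize q) (by simp)
          rw [hq0] at this
          simp only [PySem.Set.contains_eq_listContains, List.contains_eq_mem]
          simpa using this
        have hrunne : cur.isEmpty = false := by
          cases cur with
          | nil => exact absurd rfl hc
          | cons a t => rfl
        have hstep : pvLoopB (f :: rest) groups seen cur prev
            = pvLoopB rest (groups ++ [cur]) (seen.add f.1) [f] f.1 := by
          simp only [pvLoopB, hcond, if_true, hcont, Bool.false_eq_true, if_false, hrunne]
        have hn' : ((pvRunsGo f.1 [f] rest).map pvHeadSize).tail.Nodup := by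
          rw [hq]; simp only [List.map_cons, List.tail_cons]
          exact (List.nodup_cons.mp hn).2
        have hs' : ∀ h ∈ ((pvRunsGo f.1 [f] rest).map pvHeadSize).tail, ¬ h ∈ seen.add f.1 := by
          rw [hq]; simp only [List.map_cons, List.tail_cons]
          intro h hh
          rw [PySem.Set.mem_add]
          push Not
          constructor
          · exact hs h (by simp [hh])
          · intro heq
            have hne : pvHeadSize q ∉ qs.map pvHeadSize := (List.nodup_cons.mp hn).1
            rw [← hq0] at heq
            exact hne (heq ▸ hh)
        rw [hstep, ih f.1 [f] (groups ++ [cur]) (seen.add f.1) (by simp) hn' hs']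
        rw [hgo, hq]
        simp
    · have hcond' : prev ≠ 0 ∧ f.1 = prev := by
        simp only [Bool.or_eq_true, beq_iff_eq, bne_iff_ne, ne_eq, not_or, not_not] at hcond
        exact hcond
      have hgo : pvRunsGo prev cur (f :: rest) = pvRunsGo prev (cur ++ [f]) rest := by
        simp only [pvRunsGo]
        rw [if_neg (by simp [hcond'.1, hcond'.2])]
      have hstep : pvLoopB (f :: rest) groups seen cur prev
          = pvLoopB rest groups seen (cur ++ [f]) prev := by
        simp only [pvLoopB]
        rw [if_neg (by simp [hcond'.1, hcond'.2])]
      rw [hstep, hgo]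
      rw [hgo] at hn hs
      exact ih prev (cur ++ [f]) groups seen (by simp) hn hs

theorem pvBkAdd_nil (r : List pvF) : pvBkAdd [] r = r.map (fun x => [x]) := by
  induction r with
  | nil => rfl
  | cons x xs ih => simp [pvBkAdd, ih]

theorem pvBkAdd_of_length_eq (fss : List (List pvF)) (r : List pvF) (h : fss.length = r.length) :
    pvBkAdd fss r = List.zipWith (fun b x => b ++ [x]) fss r := by
  induction fss generalizing r with
  | nil => cases r with | nil => rfl | cons x xs => simp at h
  | cons b bs ih =>
    cases r with
    | nil => simp at h
    | cons x xs => simp only [pvBkAdd, List.zipWith]; rw [ih xs (by simpa using h)]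

-- the folded buckets are exactly the transpose when all runs share one length
theorem pvFoldBkAdd_eq_cols (rs : List (List pvF)) (n : Nat)
    (h : ∀ r ∈ rs, r.length = n) (hne : rs ≠ []) :
    rs.foldl pvBkAdd [] = (List.range n).map (fun i => rs.map (fun g => g.getD i pvDefFrame)) := by
  revert h hne
  induction rs using List.reverseRecOn with
  | nil => intro h hne; exact absurd rfl hne
  | append_singleton rs r ih =>
    intro h hne
    rw [List.foldl_append]
    simp only [List.foldl_cons, List.foldl_nil]
    have hr : r.length = n := h r (by simp)
    by_cases hrs : rs = []
    · subst hrs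
      simp only [List.foldl_nil]
      rw [pvBkAdd_nil]
      apply List.ext_getElem
      · simp [hr]
      · intro i h1 h2
        simp only [List.getElem_map, List.getElem_range, List.nil_append, List.map_cons,
          List.map_nil]
        rw [List.getD_eq_getElem r pvDefFrame (by simp at h1; omega)]
    · rw [ih (fun q hq => h q (by simp [hq])) hrs]
      rw [pvBkAdd_of_length_eq _ _ (by simp [hr])]
      apply List.ext_getElem
      · simp [hr]
      · intro i h1 h2
        rw [List.getElem_zipWith]
        simp only [List.getElem_map, List.getElem_range, List.map_append, List.map_cons,
          List.map_nil]
        congr 1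
        rw [List.getD_eq_getElem r pvDefFrame (by simp [hr] at h1 ⊢; omega)]

theorem pvLenChainOk_of_const (l : List (List pvF)) (k : Nat)
    (h : ∀ x ∈ l, x.length = k) : pvLenChainOk l = true := by
  induction l with
  | nil => rfl
  | cons a t ih =>
    cases t with
    | nil => rfl
    | cons b t' =>
      simp only [pvLenChainOk, Bool.and_eq_true, beq_iff_eq]
      refine ⟨by rw [h a (by simp), h b (by simp)], ih ?_⟩
      intro x hx; exact h x (by simp [hx])

theorem pvDurChainOk_of_const (l : List pvF) (c : Int)
    (h : ∀ x ∈ l, x.2.2.2.2 = c) : pvDurChainOk l = true := by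
  induction l with
  | nil => rfl
  | cons a t ih =>
    cases t with
    | nil => rfl
    | cons b t' =>
      simp only [pvDurChainOk, Bool.and_eq_true, beq_iff_eq]
      refine ⟨by rw [h a (by simp), h b (by simp)], ih ?_⟩
      intro x hx; exact h x (by simp [hx])

theorem pvDurOkB_of_const (l : List pvF) (c : Int)
    (h : ∀ x ∈ l, x.2.2.2.2 = c) : pvDurOkB l = true := by
  cases l with
  | nil => rfl
  | cons a t =>
    simp only [pvDurOkB, List.all_eq_true, beq_iff_eq]
    intro x hx
    rw [h x hx, List.headD_cons, h a (by simp)]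

-- ===== VERDICT (by name: the statement is the Claim_ definition above) =====
theorem pvSplitByLoop_eq (l : List pvF) (x : pvF) (gRev : List pvF)
    (accRev : List (List pvF))
    (hg : ∀ y ∈ gRev, y.1 = x.1)
    (hz : x.1 = 0 → gRev = [])
    (hchain : List.IsChain (fun p q : pvF => p.1 = q.1 → p.1 ≠ 0) (x :: l)) :
    List.splitBy.loop (fun a b => a.1 == b.1) l x gRev accRev
      = accRev.reverse ++ pvRunsGo x.1 (gRev.reverse ++ [x]) l := by
  induction l generalizing x gRev accRev with
  | nil =>
    rw [List.splitBy.loop.eq_2]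
    simp [pvRunsGo]
  | cons a as ih =>
    rw [List.splitBy.loop.eq_1]
    by_cases hxa : x.1 = a.1
    · have hx0 : x.1 ≠ 0 := (List.isChain_cons_cons.mp hchain).1 hxa
      have hR : (x.1 == a.1) = true := by simp [hxa]
      simp only [hR]
      rw [ih a (x :: gRev) accRev
          (by intro y hy
              rcases List.mem_cons.mp hy with h | h
              · rw [h, hxa]
              · rw [hg y h, hxa])
          (by intro h0; exact absurd (hxa.trans h0) hx0)
          (by exact (List.isChain_cons_cons.mp hchain).2)]
      have hgo : pvRunsGo x.1 (gRev.reverse ++ [x]) (a :: as)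
          = pvRunsGo x.1 (gRev.reverse ++ [x] ++ [a]) as := by
        simp only [pvRunsGo]
        rw [if_neg (by
          simp only [Bool.or_eq_true, beq_iff_eq, bne_iff_ne, ne_eq, not_or, not_not]
          exact ⟨hx0, hxa.symm⟩)]
      rw [hgo, ← hxa]
      simp
    · have hR : (x.1 == a.1) = false := by simp [hxa]
      simp only [hR]
      rw [ih a [] ((x :: gRev).reverse :: accRev) (by simp) (by simp)
          (by exact (List.isChain_cons_cons.mp hchain).2)]
      have hgo : pvRunsGo x.1 (gRev.reverse ++ [x]) (a :: as)
          = (gRev.reverse ++ [x]) :: pvRunsGo a.1 [a] as := by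
        simp only [pvRunsGo]
        rw [if_pos (by simp [Ne.symm hxa])]
      rw [hgo]
      simp

theorem pvRuns_eq_pvGroups (frames : List pvF)
    (h : List.IsChain (fun p q : pvF => p.1 = q.1 → p.1 ≠ 0) frames) :
    pvRuns frames = pvGroups frames := by
  cases frames with
  | nil => rfl
  | cons f rest =>
    unfold pvGroups
    rw [List.splitBy.eq_2]
    rw [pvSplitByLoop_eq rest f [] [] (by simp) (by simp) h]
    simp [pvRuns]

theorem pvFoldlMin_const (gs : List (List pvF)) (n : Nat)
    (h : ∀ g ∈ gs, g.length = n) : gs.foldl (fun m g => min m g.length) n = n := by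
  induction gs with
  | nil => rfl
  | cons g gs ih =>
    simp only [List.foldl_cons, h g (by simp), Nat.min_self]
    exact ih (fun q hq => h q (by simp [hq]))

theorem make_framesets_spec : Claim_equal_make_framesets := by
  unfold Claim_equal_make_framesets
  intro frames hdom hpre
  unfold Spec_make_framesets
  obtain ⟨hchain, hnd, hlen, hdur⟩ := hpre
  cases frames with
  | nil => rfl
  | cons f rest =>
    simp only [pvGroupLen] at hnd hlen hdur
    rw [← pvRuns_eq_pvGroups _ hchain] at hnd hlen hdur
    simp only [pvRuns] at hnd hlen hdur
    have hne : pvRunsGo f.1 [f] rest ≠ [] := pvRunsGo_ne_nil rest f.1 [f]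
    obtain ⟨h1, h4⟩ := pvRunsGo_good rest f.1 [f] (by simp) (by simp) (by simp)
    have hflat : (pvRunsGo f.1 [f] rest).flatten = f :: rest := by
      simpa using pvRunsGo_flatten rest f.1 [f]
    have hheadsize : pvHeadSize ((pvRunsGo f.1 [f] rest).headD []) = f.1 := by
      simpa [pvHeadSize] using pvRunsGo_head_size rest f.1 [f] (by simp)
    have hBuck : (pvRunsGo f.1 [f] rest).foldl pvBkAdd []
        = (List.range ((pvRunsGo f.1 [f] rest).headD []).length).map
            (fun i => (pvRunsGo f.1 [f] rest).map (fun g => g.getD i pvDefFrame)) :=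
      pvFoldBkAdd_eq_cols _ _ hlen hne
    have hchk1 : pvLenChainOk ((List.range ((pvRunsGo f.1 [f] rest).headD []).length).map
        (fun i => (pvRunsGo f.1 [f] rest).map (fun g => g.getD i pvDefFrame))) = true := by
      apply pvLenChainOk_of_const _ (pvRunsGo f.1 [f] rest).length
      intro x hx
      rw [List.mem_map] at hx
      obtain ⟨i, _, rfl⟩ := hx
      simp
    have hdurcol : ∀ col ∈ (List.range ((pvRunsGo f.1 [f] rest).headD []).length).map
        (fun i => (pvRunsGo f.1 [f] rest).map (fun g => g.getD i pvDefFrame)),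
        ∃ c, ∀ x ∈ col, x.2.2.2.2 = c := by
      intro col hcol
      rw [List.mem_map] at hcol
      obtain ⟨i, hi, rfl⟩ := hcol
      refine ⟨(((pvRunsGo f.1 [f] rest).headD []).getD i pvDefFrame).2.2.2.2, ?_⟩
      intro x hx
      rw [List.mem_map] at hx
      obtain ⟨r, hr, rfl⟩ := hx
      exact hdur i hi r hr
    have hchk2 : ((List.range ((pvRunsGo f.1 [f] rest).headD []).length).map
        (fun i => (pvRunsGo f.1 [f] rest).map (fun g => g.getD i pvDefFrame))).all
          pvDurChainOk = true := by
      rw [List.all_eq_true]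
      intro col hcol
      obtain ⟨c, hc⟩ := hdurcol col hcol
      exact pvDurChainOk_of_const col c hc
    -- A's value
    have hA : pvLoopA (f :: rest) [] PySem.Set.empty 0 0
        = some ((pvRunsGo f.1 [f] rest).foldl pvBkAdd []) := by
      conv_lhs => rw [← hflat]
      exact pvLoopA_runs _ _ _ _ _ h1 h4 (fun _ => Or.inl rfl)
        (by intro r hr; simp [PySem.Set.empty]) hnd
    have hAval : make_framesets (f :: rest)
        = pvSortRev ((List.range ((pvRunsGo f.1 [f] rest).headD []).length).map
            (fun i => (pvRunsGo f.1 [f] rest).map (fun g => g.getD i pvDefFrame))) := by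
      unfold make_framesets
      rw [hA, hBuck]
      simp only [hchk1, hchk2, if_true]
    -- B's value
    have hstepB : pvLoopB (f :: rest) [] PySem.Set.empty [] 0
        = pvLoopB rest [] (PySem.Set.empty.add f.1) [f] f.1 := by
      simp [pvLoopB]
    have htailfacts : pvHeadSize ((pvRunsGo f.1 [f] rest).headD [])
          ∉ ((pvRunsGo f.1 [f] rest).map pvHeadSize).tail ∧
        ((pvRunsGo f.1 [f] rest).map pvHeadSize).tail.Nodup := by
      cases hq : pvRunsGo f.1 [f] rest with
      | nil => exact absurd hq hne
      | cons r0 rtl =>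
        rw [hq] at hnd
        simp only [List.map_cons, List.nodup_cons] at hnd
        simpa using hnd
    have hBloop : pvLoopB rest [] (PySem.Set.empty.add f.1) [f] f.1
        = some ([] ++ (pvRunsGo f.1 [f] rest).dropLast, (pvRunsGo f.1 [f] rest).getLastD []) := by
      apply pvLoopB_runs rest f.1 [f] [] (PySem.Set.empty.add f.1) (by simp) htailfacts.2
      intro h hh
      rw [PySem.Set.mem_add]
      push Not
      constructor
      · simp [PySem.Set.empty]
      · intro heq
        subst heq
        apply htailfacts.1
        rw [hheadsize]
        exact hh
    have hlastne : (pvRunsGo f.1 [f] rest).getLastD [] ≠ [] := by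
      rw [List.getLastD_eq_getLast?, List.getLast?_eq_some_getLast hne]
      exact (h1 _ (List.getLast_mem hne)).1
    have hlastempty : ((pvRunsGo f.1 [f] rest).getLastD []).isEmpty = false := by
      cases hq : (pvRunsGo f.1 [f] rest).getLastD [] with
      | nil => exact absurd hq hlastne
      | cons a t => rfl
    have hrecon : (pvRunsGo f.1 [f] rest).dropLast ++ [(pvRunsGo f.1 [f] rest).getLastD []]
        = pvRunsGo f.1 [f] rest := by
      rw [List.getLastD_eq_getLast?, List.getLast?_eq_some_getLast hne]
      exact List.dropLast_concat_getLast hne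
    have hlenok : pvLenOkB (pvRunsGo f.1 [f] rest) = true := by
      cases hq : pvRunsGo f.1 [f] rest with
      | nil => rfl
      | cons r0 rtl =>
        simp only [pvLenOkB, List.all_eq_true, beq_iff_eq]
        intro g hg
        rw [hlen g (by rw [hq]; simp [hg]), hlen r0 (by rw [hq]; simp)]
    have htrans : pvTransposeB (pvRunsGo f.1 [f] rest)
        = (List.range ((pvRunsGo f.1 [f] rest).headD []).length).map
            (fun i => (pvRunsGo f.1 [f] rest).map (fun g => g.getD i pvDefFrame)) := by
      cases hq : pvRunsGo f.1 [f] rest with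
      | nil => exact absurd hq hne
      | cons r0 rtl =>
        have hn0 : ∀ g ∈ r0 :: rtl, g.length = r0.length := by
          intro g hg
          have h' := hlen g (by rw [hq]; exact hg)
          rw [hq] at h'
          simpa using h'
        simp only [pvTransposeB, List.headD_cons]
        rw [pvFoldlMin_const _ _ hn0]
    have hchk2B : ((List.range ((pvRunsGo f.1 [f] rest).headD []).length).map
        (fun i => (pvRunsGo f.1 [f] rest).map (fun g => g.getD i pvDefFrame))).all
          pvDurOkB = true := by
      rw [List.all_eq_true]
      intro col hcol
      obtain ⟨c, hc⟩ := hdurcol col hcol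
      exact pvDurOkB_of_const col c hc
    have hBval : make_framesets_alt (f :: rest)
        = pvSortRev ((List.range ((pvRunsGo f.1 [f] rest).headD []).length).map
            (fun i => (pvRunsGo f.1 [f] rest).map (fun g => g.getD i pvDefFrame))) := by
      unfold make_framesets_alt
      rw [hstepB, hBloop]
      simp only [hlastempty, Bool.false_eq_true, if_false, List.nil_append, hrecon, hlenok,
        if_true, htrans, hchk2B]
    rw [hAval, hBval]
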